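-- pv_equiv track=rewrite | github.com/BaiZeS/PageIndex-UV | main.py | pages_from_nodes
-- ===== SOURCE A (Python) =====
-- def pages_from_nodes(nodes):
--     seen = set()
--     pages = []
--     for node in nodes:
--         start = node.get('start_index')
--         end = node.get('end_index')
--         if start is None or end is None:
--             continue
--         for p in range(start, end + 1):
--             if p not in seen:
--                 seen.add(p)
--                 pages.append(p)
--     return pages
-- ===== SOURCE B (Python) =====
-- def merge_interval(ivs, s, e):
--     # Merge [s, e] into the sorted, disjoint, non-adjacent interval list ivs.
--     res = []
--     i = 0
--     while i < len(ivs):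
--         lo, hi = ivs[i]
--         if hi < s - 1:
--             res.append((lo, hi))
--         elif lo <= e + 1:
--             s = min(s, lo)
--             e = max(e, hi)
--         else:
--             break
--         i += 1
--     return res + [(s, e)] + ivs[i:]
--
--
-- def pages_from_nodes(nodes):
--     # Covered-interval set: keep the already-emitted pages as a sorted list of
--     # disjoint intervals; per node range emit only the uncovered gaps (in
--     # increasing order, which is first-appearance order), then merge the range.
--     ivs = []     # sorted, disjoint, non-adjacent covered intervals
--     pages = []
--     for node in nodes:
--         s = node.get('start_index')
--         e = node.get('end_index')
--         if s is None or e is None: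
--             continue
--         if s > e:
--             continue
--         cur = s
--         for lo, hi in ivs:
--             if hi < cur:
--                 continue
--             if lo > e:
--                 break
--             if cur < lo:
--                 pages.extend(range(cur, lo))
--             cur = hi + 1
--             if cur > e:
--                 break
--         if cur <= e:
--             pages.extend(range(cur, e + 1))
--         ivs = merge_interval(ivs, s, e)
--     return pages
-- ===== Notes on version B (the rewrite author's own statement) =====
-- stated objective: alternative
-- what changed: B replaces A's page-by-page seen-set scan with a sorted covered-interval set: per node range it emits only the uncovered gaps and merges the range into the interval list, never revisiting already-covered pages.
import Mathlib
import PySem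

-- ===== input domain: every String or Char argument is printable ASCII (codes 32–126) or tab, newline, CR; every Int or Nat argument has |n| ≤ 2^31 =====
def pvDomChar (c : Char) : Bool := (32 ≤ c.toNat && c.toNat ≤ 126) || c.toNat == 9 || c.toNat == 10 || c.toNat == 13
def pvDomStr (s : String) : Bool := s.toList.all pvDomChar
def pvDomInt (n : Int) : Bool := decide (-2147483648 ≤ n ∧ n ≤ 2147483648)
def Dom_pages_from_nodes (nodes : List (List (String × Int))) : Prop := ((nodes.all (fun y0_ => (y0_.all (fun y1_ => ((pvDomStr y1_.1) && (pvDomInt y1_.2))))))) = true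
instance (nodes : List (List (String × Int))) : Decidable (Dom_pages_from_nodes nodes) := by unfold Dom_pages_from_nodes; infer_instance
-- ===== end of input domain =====

-- B keeps the already-emitted pages as a sorted disjoint covered-interval list and emits only
-- the uncovered gaps of each node range, instead of A's page-by-page seen-set scan.

-- ===== PORT A =====
def pages_from_nodes (nodes : List (List (String × Int))) : List Int :=
  (nodes.foldl
    (fun (st : PySem.Set Int × List Int) node =>
      match (PySem.Dict.ofList node).get? "start_index", (PySem.Dict.ofList node).get? "end_index" with
      | some s, some e =>
        (PySem.List.pyRange s (e + 1) 1).foldl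
          (fun (st2 : PySem.Set Int × List Int) p =>
            if PySem.Set.contains st2.1 p then st2
            else (PySem.Set.add st2.1 p, st2.2 ++ [p])) st
      | _, _ => st)
    (PySem.Set.empty, [])).2

-- ===== PORT B =====
-- Source B's merge_interval: merge [s,e] into the sorted, disjoint, non-adjacent interval list.
def mergeIv (s e : Int) : List (Int × Int) → List (Int × Int)
  | [] => [(s, e)]
  | (lo, hi) :: rest =>
    if hi < s - 1 then (lo, hi) :: mergeIv s e rest
    else if lo ≤ e + 1 then mergeIv (min s lo) (max e hi) rest
    else (s, e) :: (lo, hi) :: rest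

-- Source B's inner emit loop (mutable cur + continue/break + the after-loop tail emit).
def gapsEmit (cur e : Int) : List (Int × Int) → List Int
  | [] => if cur ≤ e then PySem.List.pyRange cur (e + 1) 1 else []
  | (lo, hi) :: rest =>
    if hi < cur then gapsEmit cur e rest
    else if lo > e then (if cur ≤ e then PySem.List.pyRange cur (e + 1) 1 else [])
    else (if cur < lo then PySem.List.pyRange cur lo 1 else []) ++
         (if hi + 1 > e then [] else gapsEmit (hi + 1) e rest)

def pages_from_nodes_alt (nodes : List (List (String × Int))) : List Int :=
  (nodes.foldl
    (fun (st : List (Int × Int) × List Int) node =>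
      match (PySem.Dict.ofList node).get? "start_index" with
      | none => st
      | some s =>
        match (PySem.Dict.ofList node).get? "end_index" with
        | none => st
        | some e =>
          if s > e then st
          else (mergeIv s e st.1, st.2 ++ gapsEmit s e st.1))
    ([], [])).2

-- ===== PRECONDITION & SPEC =====
def Spec_pages_from_nodes (nodes : List (List (String × Int))) (out : List Int) : Prop := out = pages_from_nodes_alt nodes
instance (nodes : List (List (String × Int))) (out : List Int) : Decidable (Spec_pages_from_nodes nodes out) := by unfold Spec_pages_from_nodes; infer_instance

-- ===== CLAIM (what is proved, stated in full; the proofs are below) =====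
def Claim_equal_pages_from_nodes : Prop := ∀ (nodes : List (List (String × Int))), Dom_pages_from_nodes nodes → Spec_pages_from_nodes nodes (pages_from_nodes nodes)

-- ===== LEMMAS AND PROOFS =====

-- p lies in some interval of ivs
def covered (p : Int) (ivs : List (Int × Int)) : Bool :=
  ivs.any (fun q => decide (q.1 ≤ p) && decide (p ≤ q.2))

-- sorted, disjoint, non-adjacent, nonempty intervals
def IvInv : List (Int × Int) → Prop
  | [] => True
  | (lo, hi) :: rest => lo ≤ hi ∧ (∀ q ∈ rest, hi + 1 < q.1) ∧ IvInv rest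

-- the per-node reference step both sides are reduced to
def stepSet (acc : List Int) (node : List (String × Int)) : List Int :=
  match (PySem.Dict.ofList node).get? "start_index", (PySem.Dict.ofList node).get? "end_index" with
  | some s, some e => (PySem.List.pyRange s (e + 1) 1).foldl PySem.Set.add acc
  | _, _ => acc

theorem covered_iff (p : Int) (ivs : List (Int × Int)) :
    covered p ivs = true ↔ ∃ q ∈ ivs, q.1 ≤ p ∧ p ≤ q.2 := by
  simp [covered]

theorem covered_cons (p lo hi : Int) (rest : List (Int × Int)) :
    covered p ((lo, hi) :: rest)
      = ((decide (lo ≤ p) && decide (p ≤ hi)) || covered p rest) := by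
  simp [covered]

theorem covered_false_of (p : Int) (ivs : List (Int × Int))
    (h : ∀ q ∈ ivs, ¬(q.1 ≤ p ∧ p ≤ q.2)) : covered p ivs = false := by
  cases hc : covered p ivs
  · rfl
  · exfalso
    rcases (covered_iff p ivs).mp hc with ⟨q, hq, h1, h2⟩
    exact h q hq ⟨h1, h2⟩

theorem covered_true_of (p : Int) (ivs : List (Int × Int)) (q : Int × Int)
    (hq : q ∈ ivs) (h1 : q.1 ≤ p) (h2 : p ≤ q.2) : covered p ivs = true :=
  (covered_iff p ivs).mpr ⟨q, hq, h1, h2⟩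

theorem inner_loop_eq (l : List Int) (s : List Int) :
    l.foldl
      (fun (st2 : PySem.Set Int × List Int) p =>
        if PySem.Set.contains st2.1 p then st2
        else (PySem.Set.add st2.1 p, st2.2 ++ [p])) (s, s)
    = (l.foldl PySem.Set.add s, l.foldl PySem.Set.add s) := by
  induction l generalizing s with
  | nil => rfl
  | cons p l ih =>
    simp only [List.foldl_cons]
    by_cases h : PySem.Set.contains s p = true
    · have ha : PySem.Set.add s p = s := by
        simp [PySem.Set.add, (PySem.Set.contains_iff _ _).mp h]
      rw [if_pos h, ha, ih]
    · have hm : p ∉ s := fun hm => h ((PySem.Set.contains_iff _ _).mpr hm)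
      have ha : PySem.Set.add s p = s ++ [p] := by simp [PySem.Set.add, hm]
      rw [if_neg h, ha, ih]

theorem outer_loop_eq (nodes : List (List (String × Int))) (s : List Int) :
    nodes.foldl
      (fun (st : PySem.Set Int × List Int) node =>
        match (PySem.Dict.ofList node).get? "start_index", (PySem.Dict.ofList node).get? "end_index" with
        | some s, some e =>
          (PySem.List.pyRange s (e + 1) 1).foldl
            (fun (st2 : PySem.Set Int × List Int) p =>
              if PySem.Set.contains st2.1 p then st2
              else (PySem.Set.add st2.1 p, st2.2 ++ [p])) st
        | _, _ => st)
      (s, s)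
    = (nodes.foldl stepSet s, nodes.foldl stepSet s) := by
  induction nodes generalizing s with
  | nil => rfl
  | cons node rest ih =>
    simp only [List.foldl_cons, stepSet]
    cases h1 : (PySem.Dict.ofList node).get? "start_index" with
    | none => dsimp only; exact ih s
    | some a =>
      cases h2 : (PySem.Dict.ofList node).get? "end_index" with
      | none => dsimp only; exact ih s
      | some b =>
        dsimp only
        rw [inner_loop_eq]
        exact ih _

-- folding Set.add over a duplicate-free list appends exactly the not-yet-contained elements
theorem foldl_add_nodup (l : List Int) (acc : List Int) (h : l.Nodup) :
    l.foldl PySem.Set.add acc = acc ++ l.filter (fun p => !PySem.Set.contains acc p) := by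
  induction l generalizing acc with
  | nil => simp
  | cons p l ih =>
    have hnd : l.Nodup := (List.nodup_cons.mp h).2
    have hpl : p ∉ l := (List.nodup_cons.mp h).1
    simp only [List.foldl_cons]
    by_cases hc : PySem.Set.contains acc p = true
    · have ha : PySem.Set.add acc p = acc := by
        simp [PySem.Set.add, (PySem.Set.contains_iff _ _).mp hc]
      rw [ha, ih _ hnd]
      have hmem : p ∈ acc := (PySem.Set.contains_iff _ _).mp hc
      simp [hmem]
    · have hm : p ∉ acc := fun hm => hc ((PySem.Set.contains_iff _ _).mpr hm)
      have ha : PySem.Set.add acc p = acc ++ [p] := by simp [PySem.Set.add, hm]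
      rw [ha, ih _ hnd]
      have hcong : l.filter (fun q => !PySem.Set.contains (acc ++ [p]) q)
          = l.filter (fun q => !PySem.Set.contains acc q) := by
        apply List.filter_congr
        intro q hq
        have hqp : q ≠ p := fun hqe => hpl (hqe ▸ hq)
        have : PySem.Set.contains (acc ++ [p]) q = PySem.Set.contains acc q := by
          apply Bool.eq_iff_iff.mpr
          rw [PySem.Set.contains_iff, PySem.Set.contains_iff]
          simp [hqp]
        rw [this]
      rw [hcong]
      simp [hm]

theorem mergeIv_lb (c : Int) (s e : Int) (ivs : List (Int × Int))
    (hs : c < s) (h : ∀ q ∈ ivs, c < q.1) :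
    ∀ q ∈ mergeIv s e ivs, c < q.1 := by
  induction ivs generalizing s e with
  | nil => intro q hq; simp only [mergeIv, List.mem_singleton] at hq; subst hq; exact hs
  | cons iv rest ih =>
    obtain ⟨lo, hi⟩ := iv
    intro q hq
    have hlo : c < lo := h (lo, hi) (by simp)
    have hrest : ∀ q ∈ rest, c < q.1 := fun q hq => h q (by simp [hq])
    simp only [mergeIv] at hq
    split_ifs at hq with h1 h2
    · rcases List.mem_cons.mp hq with hq | hq
      · subst hq; exact hlo
      · exact ih _ _ hs hrest q hq
    · exact ih _ _ (lt_min hs hlo) hrest q hq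
    · rcases List.mem_cons.mp hq with hq | hq
      · subst hq; exact hs
      · rcases List.mem_cons.mp hq with hq | hq
        · subst hq; exact hlo
        · exact hrest q hq

theorem mergeIv_inv (s e : Int) (ivs : List (Int × Int))
    (hse : s ≤ e) (hinv : IvInv ivs) : IvInv (mergeIv s e ivs) := by
  induction ivs generalizing s e with
  | nil => exact ⟨hse, by simp, trivial⟩
  | cons iv rest ih =>
    obtain ⟨lo, hi⟩ := iv
    obtain ⟨hlohi, hgap, hrest⟩ := hinv
    simp only [mergeIv]
    split_ifs with h1 h2
    · exact ⟨hlohi, mergeIv_lb (hi + 1) s e rest (by omega) hgap, ih _ _ hse hrest⟩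
    · exact ih _ _ (by omega) hrest
    · refine ⟨hse, ?_, hlohi, hgap, hrest⟩
      intro q hq
      rcases List.mem_cons.mp hq with hq | hq
      · subst hq; omega
      · have := hgap q hq; omega

theorem mergeIv_covered (s e : Int) (ivs : List (Int × Int)) (p : Int)
    (hse : s ≤ e) (hinv : IvInv ivs) :
    covered p (mergeIv s e ivs)
      = (covered p ivs || (decide (s ≤ p) && decide (p ≤ e))) := by
  induction ivs generalizing s e with
  | nil => simp [mergeIv, covered]
  | cons iv rest ih =>
    obtain ⟨lo, hi⟩ := iv
    obtain ⟨hlohi, hgap, hrest⟩ := hinv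
    simp only [mergeIv]
    split_ifs with h1 h2
    · rw [covered_cons, ih _ _ hse hrest, covered_cons, Bool.or_assoc]
    · rw [ih _ _ (by omega) hrest, covered_cons]
      apply Bool.eq_iff_iff.mpr
      simp only [Bool.or_eq_true, Bool.and_eq_true, decide_eq_true_eq]
      constructor
      · rintro (h | ⟨h3, h4⟩)
        · exact Or.inl (Or.inr h)
        · by_cases hp : lo ≤ p ∧ p ≤ hi
          · exact Or.inl (Or.inl hp)
          · exact Or.inr ⟨by omega, by omega⟩
      · rintro ((h | h) | h)
        · exact Or.inr ⟨by omega, by omega⟩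
        · exact Or.inl h
        · exact Or.inr ⟨by omega, by omega⟩
    · rw [covered_cons, covered_cons]
      simp only [Bool.or_comm, Bool.or_left_comm]

theorem gapsEmit_eq (e : Int) (ivs : List (Int × Int)) (cur : Int) (hinv : IvInv ivs) :
    gapsEmit cur e ivs
      = (PySem.List.pyRange cur (e + 1) 1).filter (fun p => !covered p ivs) := by
  induction ivs generalizing cur with
  | nil =>
    simp only [gapsEmit]
    split_ifs with h
    · simp [covered]
    · rw [PySem.List.pyRange_one_eq_nil (by omega)]; simp
  | cons iv rest ih =>
    obtain ⟨lo, hi⟩ := iv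
    obtain ⟨hlohi, hgap, hrest⟩ := hinv
    simp only [gapsEmit]
    split_ifs with h1 h2 h3 h4 h5 h6
    · -- hi < cur : interval entirely left of the range
      rw [ih _ hrest]
      apply List.filter_congr
      intro p hp
      have hp' := (PySem.List.mem_pyRange_one).mp hp
      rw [covered_cons]
      have : (decide (lo ≤ p) && decide (p ≤ hi)) = false := by
        have : ¬ p ≤ hi := by omega
        simp [this]
      rw [this, Bool.false_or]
    · -- lo > e, cur ≤ e : nothing in the range is covered
      symm
      apply List.filter_eq_self.mpr
      intro p hp
      have hp' := (PySem.List.mem_pyRange_one).mp hp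
      have : covered p ((lo, hi) :: rest) = false := by
        apply covered_false_of
        intro q hq
        rcases List.mem_cons.mp hq with hq | hq
        · subst hq; dsimp only; omega
        · have := hgap q hq; omega
      simp [this]
    · -- lo > e, cur > e : empty range
      rw [PySem.List.pyRange_one_eq_nil (by omega)]; simp
    · -- cur < lo, hi + 1 > e  (so e ≤ hi): emit [cur, lo), the rest of the range is covered
      rw [PySem.List.pyRange_one_append cur lo (e + 1) (by omega) (by omega),
        List.filter_append]
      have hA : (PySem.List.pyRange cur lo 1).filter (fun p => !covered p ((lo, hi) :: rest))
          = PySem.List.pyRange cur lo 1 := by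
        apply List.filter_eq_self.mpr
        intro p hp
        have hp' := (PySem.List.mem_pyRange_one).mp hp
        have : covered p ((lo, hi) :: rest) = false := by
          apply covered_false_of
          intro q hq
          rcases List.mem_cons.mp hq with hq | hq
          · subst hq; dsimp only; omega
          · have := hgap q hq; omega
        simp [this]
      have hB : (PySem.List.pyRange lo (e + 1) 1).filter (fun p => !covered p ((lo, hi) :: rest)) = [] := by
        apply List.filter_eq_nil_iff.mpr
        intro p hp
        have hp' := (PySem.List.mem_pyRange_one).mp hp
        have : covered p ((lo, hi) :: rest) = true :=
          covered_true_of p _ (lo, hi) (by simp) (by dsimp only; omega) (by dsimp only; omega)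
        simp [this]
      rw [hA, hB]
    · -- cur < lo, hi + 1 ≤ e : emit [cur, lo), skip [lo, hi], recurse at hi + 1
      rw [ih _ hrest,
        PySem.List.pyRange_one_append cur lo (e + 1) (by omega) (by omega),
        PySem.List.pyRange_one_append lo (hi + 1) (e + 1) (by omega) (by omega),
        List.filter_append, List.filter_append]
      have hA : (PySem.List.pyRange cur lo 1).filter (fun p => !covered p ((lo, hi) :: rest))
          = PySem.List.pyRange cur lo 1 := by
        apply List.filter_eq_self.mpr
        intro p hp
        have hp' := (PySem.List.mem_pyRange_one).mp hp
        have : covered p ((lo, hi) :: rest) = false := by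
          apply covered_false_of
          intro q hq
          rcases List.mem_cons.mp hq with hq | hq
          · subst hq; dsimp only; omega
          · have := hgap q hq; omega
        simp [this]
      have hB : (PySem.List.pyRange lo (hi + 1) 1).filter (fun p => !covered p ((lo, hi) :: rest)) = [] := by
        apply List.filter_eq_nil_iff.mpr
        intro p hp
        have hp' := (PySem.List.mem_pyRange_one).mp hp
        have : covered p ((lo, hi) :: rest) = true :=
          covered_true_of p _ (lo, hi) (by simp) (by dsimp only; omega) (by dsimp only; omega)
        simp [this]
      have hC : (PySem.List.pyRange (hi + 1) (e + 1) 1).filter (fun p => !covered p ((lo, hi) :: rest))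
          = (PySem.List.pyRange (hi + 1) (e + 1) 1).filter (fun p => !covered p rest) := by
        apply List.filter_congr
        intro p hp
        have hp' := (PySem.List.mem_pyRange_one).mp hp
        rw [covered_cons]
        have : (decide (lo ≤ p) && decide (p ≤ hi)) = false := by
          have : ¬ p ≤ hi := by omega
          simp [this]
        rw [this, Bool.false_or]
      rw [hA, hB, hC]
      simp
    · -- cur ≥ lo, hi + 1 > e : the whole range is covered by (lo, hi)
      symm
      apply List.filter_eq_nil_iff.mpr
      intro p hp
      have hp' := (PySem.List.mem_pyRange_one).mp hp
      have : covered p ((lo, hi) :: rest) = true :=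
        covered_true_of p _ (lo, hi) (by simp) (by dsimp only; omega) (by dsimp only; omega)
      simp [this]
    · -- cur ≥ lo, hi + 1 ≤ e : [cur, hi] covered, recurse at hi + 1
      rw [ih _ hrest,
        PySem.List.pyRange_one_append cur (hi + 1) (e + 1) (by omega) (by omega),
        List.filter_append]
      have hB : (PySem.List.pyRange cur (hi + 1) 1).filter (fun p => !covered p ((lo, hi) :: rest)) = [] := by
        apply List.filter_eq_nil_iff.mpr
        intro p hp
        have hp' := (PySem.List.mem_pyRange_one).mp hp
        have : covered p ((lo, hi) :: rest) = true :=
          covered_true_of p _ (lo, hi) (by simp) (by dsimp only; omega) (by dsimp only; omega)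
        simp [this]
      have hC : (PySem.List.pyRange (hi + 1) (e + 1) 1).filter (fun p => !covered p ((lo, hi) :: rest))
          = (PySem.List.pyRange (hi + 1) (e + 1) 1).filter (fun p => !covered p rest) := by
        apply List.filter_congr
        intro p hp
        have hp' := (PySem.List.mem_pyRange_one).mp hp
        rw [covered_cons]
        have : (decide (lo ≤ p) && decide (p ≤ hi)) = false := by
          have : ¬ p ≤ hi := by omega
          simp [this]
        rw [this, Bool.false_or]
      rw [hB, hC]

-- the master correspondence: B's fold from any related state computes the reference fold
theorem b_main (nodes : List (List (String × Int))) (ivs : List (Int × Int)) (pages : List Int)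
    (hinv : IvInv ivs) (hcov : ∀ p, covered p ivs = PySem.Set.contains pages p) :
    (nodes.foldl
      (fun (st : List (Int × Int) × List Int) node =>
        match (PySem.Dict.ofList node).get? "start_index" with
        | none => st
        | some s =>
          match (PySem.Dict.ofList node).get? "end_index" with
          | none => st
          | some e =>
            if s > e then st
            else (mergeIv s e st.1, st.2 ++ gapsEmit s e st.1))
      (ivs, pages)).2
    = nodes.foldl stepSet pages := by
  induction nodes generalizing ivs pages with
  | nil => rfl
  | cons node rest ih =>
    simp only [List.foldl_cons, stepSet]
    cases h1 : (PySem.Dict.ofList node).get? "start_index" with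
    | none => dsimp only; exact ih ivs pages hinv hcov
    | some s =>
      cases h2 : (PySem.Dict.ofList node).get? "end_index" with
      | none => dsimp only; exact ih ivs pages hinv hcov
      | some e =>
        dsimp only
        by_cases hse : s > e
        · rw [if_pos hse, PySem.List.pyRange_one_eq_nil (by omega)]
          simp only [List.foldl_nil]
          exact ih ivs pages hinv hcov
        · rw [if_neg hse]
          have hse' : s ≤ e := by omega
          have hemit : gapsEmit s e ivs
              = (PySem.List.pyRange s (e + 1) 1).filter (fun p => !PySem.Set.contains pages p) := by
            rw [gapsEmit_eq e ivs s hinv]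
            apply List.filter_congr
            intro p _
            rw [hcov p]
          have hfold : (PySem.List.pyRange s (e + 1) 1).foldl PySem.Set.add pages
              = pages ++ gapsEmit s e ivs := by
            rw [hemit]
            exact foldl_add_nodup _ _ (PySem.List.nodup_pyRange_one _ _)
          have hcov' : ∀ p, covered p (mergeIv s e ivs)
              = PySem.Set.contains (pages ++ gapsEmit s e ivs) p := by
            intro p
            rw [mergeIv_covered s e ivs p hse' hinv, hemit]
            apply Bool.eq_iff_iff.mpr
            have hpm : covered p ivs = true ↔ p ∈ pages := by
              rw [hcov p, PySem.Set.contains_iff]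
            by_cases hm : p ∈ pages
            · have l1 : covered p ivs = true := hpm.mpr hm
              have r1 : PySem.Set.contains
                  (pages ++ List.filter (fun q => !PySem.Set.contains pages q)
                    (PySem.List.pyRange s (e + 1) 1)) p = true :=
                (PySem.Set.contains_iff _ _).mpr (List.mem_append_left _ hm)
              rw [l1, r1]; simp
            · have l1 : covered p ivs = false := by
                cases hc2 : covered p ivs
                · rfl
                · exact absurd (hpm.mp hc2) hm
              have cpf : PySem.Set.contains pages p = false := by
                cases hc2 : PySem.Set.contains pages p
                · rfl
                · exact absurd ((PySem.Set.contains_iff _ _).mp hc2) hm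
              rw [l1, Bool.false_or, PySem.Set.contains_iff]
              simp only [Bool.and_eq_true, decide_eq_true_eq, List.mem_append,
                List.mem_filter, PySem.List.mem_pyRange_one, cpf]
              constructor
              · rintro ⟨hsp, hpe⟩
                exact Or.inr ⟨⟨hsp, by omega⟩, by simp⟩
              · rintro (h | ⟨⟨hsp, hpe⟩, _⟩)
                · exact absurd h hm
                · exact ⟨hsp, by omega⟩
          rw [ih (mergeIv s e ivs) (pages ++ gapsEmit s e ivs)
            (mergeIv_inv s e ivs hse' hinv) hcov', hfold]

-- ===== VERDICT (by name: the statement is the Claim_ definition above) =====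
theorem pages_from_nodes_spec : Claim_equal_pages_from_nodes := by
  intro nodes _
  show pages_from_nodes nodes = pages_from_nodes_alt nodes
  unfold pages_from_nodes pages_from_nodes_alt
  rw [show (PySem.Set.empty : PySem.Set Int) = ([] : List Int) from rfl]
  rw [outer_loop_eq]
  rw [b_main nodes [] [] trivial (fun p => by simp [covered, PySem.Set.contains])]
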